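-- pv_equiv track=rewrite | github.com/JamesYangJian/leetcode | daily/my_code/06-26/poker_reverse.py | poker_reverse
-- ===== SOURCE A (Python) =====
-- def poker_reverse(A):
--     ret = []
--     length = len(A)
--
--     for i in range(length-1, -1, -1):
--         v = A.pop(i)
--         ret.insert(0, v)
--
--         if i != 0:
--             v1 = ret.pop(len(ret)-1)
--             ret.insert(0, v1)
--
--     return ret
-- ===== SOURCE B (Python) =====
-- def poker_reverse(A):
--     # Inverse of the "reveal cards in increasing order" game: compute, with a
--     # FIFO queue of positions, where each value of A must sit in the deck so
--     # that the deck reveals A in order, and scatter the values into a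
--     # preallocated result.  (Return value only: unlike A, this does not empty
--     # its argument.)
--     n = len(A)
--     idx = list(range(n))
--     ret = [0] * n
--     for v in A:
--         ret[idx.pop(0)] = v
--         if idx:
--             idx.append(idx.pop(0))
--     return ret
-- ===== Notes on version B (the rewrite author's own statement) =====
-- stated objective: alternative
-- what changed: Instead of A's right-to-left pop/insert(0)/rotate simulation on the value list, B computes the placement position of each value with a FIFO queue of indices (the reveal-cards process on positions) and scatters the values into a preallocated array; equivalence is about the return value only: A empties its argument, B leaves it unchanged.
import Mathlib
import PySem

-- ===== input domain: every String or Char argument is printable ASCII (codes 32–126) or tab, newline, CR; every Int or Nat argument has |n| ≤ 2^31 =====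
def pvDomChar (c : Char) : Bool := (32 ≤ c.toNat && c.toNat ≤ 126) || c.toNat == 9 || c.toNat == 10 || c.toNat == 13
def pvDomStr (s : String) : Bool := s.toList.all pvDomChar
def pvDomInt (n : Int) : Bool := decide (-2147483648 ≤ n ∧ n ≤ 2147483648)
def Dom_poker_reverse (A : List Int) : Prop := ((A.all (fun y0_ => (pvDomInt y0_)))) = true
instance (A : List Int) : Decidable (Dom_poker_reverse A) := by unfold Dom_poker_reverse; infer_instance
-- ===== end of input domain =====

-- B replaces A's right-to-left pop/insert(0)/rotate simulation on the value list by a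
-- FIFO index-queue scatter into a preallocated array (alternative decomposition);
-- return value only: Python A empties its argument, B leaves it unchanged.


-- ===== PORT A =====
-- loop body of A: v = A.pop(i); ret.insert(0, v); if i != 0: ret.insert(0, ret.pop(len(ret)-1))
def stepA (s : List Int × List Int) (i : Int) : List Int × List Int :=
  match PySem.List.pop? s.1 i with
  | none => s          -- unreachable: i is always a valid index of the shrinking list
  | some (v, lst') =>
    let ret1 := PySem.List.insert s.2 0 v
    if i ≠ 0 then
      match PySem.List.pop? ret1 ((ret1.length : Int) - 1) with
      | none => (lst', ret1)       -- unreachable: ret1 is nonempty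
      | some (v1, ret2) => (lst', PySem.List.insert ret2 0 v1)
    else (lst', ret1)

def poker_reverse (A : List Int) : List Int :=
  ((PySem.List.pyRange ((A.length : Int) - 1) (-1) (-1)).foldl stepA (A, [])).2

-- ===== PORT B =====
-- loop body of B: ret[idx.pop(0)] = v; if idx: idx.append(idx.pop(0))
def stepB (s : List Nat × List Int) (v : Int) : List Nat × List Int :=
  match s.1 with
  | [] => s            -- unreachable: idx holds exactly one position per remaining value
  | p :: idx' =>
    let ret1 := s.2.set p v
    match idx' with
    | [] => ([], ret1)
    | p2 :: rest => (rest ++ [p2], ret1)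

def poker_reverse_alt (A : List Int) : List Int :=
  (A.foldl stepB (List.range A.length, List.replicate A.length 0)).2

-- ===== PRECONDITION & SPEC =====
def Spec_poker_reverse (A : List Int) (out : List Int) : Prop := out = poker_reverse_alt A
instance (A : List Int) (out : List Int) : Decidable (Spec_poker_reverse A out) := by unfold Spec_poker_reverse; infer_instance

-- ===== CLAIM (what is proved, stated in full; the proofs are below) =====
def Claim_equal_poker_reverse : Prop := ∀ (A : List Int), Dom_poker_reverse A → Spec_poker_reverse A (poker_reverse A)

-- ===== LEMMAS AND PROOFS =====

-- The "reveal cards" game: show the top card, move the next one to the bottom.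
-- Both programs build a deck d with reveal d = A; reveal is injective, so they agree.
def reveal {α : Type} : List α → List α
  | [] => []
  | [x] => [x]
  | x :: y :: rest => x :: reveal (rest ++ [y])
termination_by l => l.length
decreasing_by simp

-- rotate the last element of a deck to the front (A's 'ret.insert(0, ret.pop(len-1))')
def rot {α : Type} (l : List α) : List α :=
  match l.getLast? with
  | none => []
  | some x => x :: l.dropLast

lemma rot_concat {α : Type} (e : List α) (x : α) : rot (e ++ [x]) = x :: e := by
  simp [rot]

lemma reveal_length {α : Type} (l : List α) : (reveal l).length = l.length := by
  induction l using reveal.induct with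
  | case1 => simp [reveal]
  | case2 x => simp [reveal]
  | case3 x y rest ih => simp [reveal, ih]

lemma reveal_map {α β : Type} (f : α → β) (l : List α) :
    reveal (l.map f) = (reveal l).map f := by
  induction l using reveal.induct with
  | case1 => simp [reveal]
  | case2 x => simp [reveal]
  | case3 x y rest ih =>
      simp only [List.map_cons]
      rw [reveal, reveal]
      simp only [List.map_cons]
      congr 1
      rw [← ih]
      congr 1
      simp

lemma reveal_inj {α : Type} (l1 l2 : List α) (h : reveal l1 = reveal l2) : l1 = l2 := by
  induction l1 using reveal.induct generalizing l2 with
  | case1 =>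
      have hl : l2.length = 0 := by
        rw [← reveal_length l2, ← h]; simp [reveal]
      exact (List.length_eq_zero_iff.mp hl).symm
  | case2 x =>
      have hl : l2.length = 1 := by
        rw [← reveal_length l2, ← h]; simp [reveal]
      obtain ⟨y, rfl⟩ := List.length_eq_one_iff.mp hl
      simpa [reveal] using h
  | case3 x y rest ih =>
      have hl : l2.length = rest.length + 2 := by
        rw [← reveal_length l2, ← h, reveal_length]; simp
      match l2 with
      | [] => simp at hl
      | [x2] => simp at hl
      | x2 :: y2 :: rest2 =>
        rw [reveal, reveal] at h
        have hx : x = x2 := by injection h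
        have ht : reveal (rest ++ [y]) = reveal (rest2 ++ [y2]) := by injection h
        have hteq := ih _ ht
        have hlen : rest.length = rest2.length := by simp at hl; omega
        obtain ⟨h1, h2⟩ := List.append_inj hteq (by omega)
        simp at h2
        simp [hx, h1, h2]

-- ===== A side: reveal (poker_reverse A) = A =====

lemma pop?_concat {α : Type} [Inhabited α] (e : List α) (x : α) :
    PySem.List.pop? (e ++ [x]) ((e.length : Int)) = some (x, e) := by
  have h := PySem.List.pop?_natCast (e ++ [x]) e.length (by simp)
  rw [h, List.eraseIdx_append_of_length_le (le_refl _)]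
  simp

lemma reveal_cons_rot {α : Type} (v : α) (e : List α) (x : α) :
    reveal (v :: rot (e ++ [x])) = v :: reveal (e ++ [x]) := by
  rw [rot_concat, reveal]

lemma lemA : ∀ (k : Nat) (pre d : List Int), pre.length = k + 1 → d ≠ [] →
    reveal (((PySem.List.pyRange (k : Int) (-1) (-1)).foldl stepA (pre, rot d)).2)
      = pre ++ reveal d := by
  intro k
  induction k with
  | zero =>
      intro pre d hlen hd
      obtain ⟨v, rfl⟩ := List.length_eq_one_iff.mp hlen
      obtain ⟨e, x, hex⟩ := (List.eq_nil_or_concat d).resolve_left hd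
      rw [List.concat_eq_append] at hex
      subst hex
      rw [PySem.List.pyRange_neg_one_cons (by norm_num),
          PySem.List.pyRange_neg_one_eq_nil (by norm_num)]
      simp only [List.foldl_cons, List.foldl_nil, Nat.cast_zero]
      rw [show stepA ([v], rot (e ++ [x])) 0
            = ([], v :: rot (e ++ [x])) by
        simp [stepA, PySem.List.pop?_zero_cons, PySem.List.insert_zero]]
      exact reveal_cons_rot v e x
  | succ k ih =>
      intro pre d hlen hd
      obtain ⟨pre', v, hpre⟩ := (List.eq_nil_or_concat pre).resolve_left
        (by intro hh; rw [hh] at hlen; simp at hlen)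
      rw [List.concat_eq_append] at hpre
      subst hpre
      have hp : pre'.length = k + 1 := by simpa using hlen
      obtain ⟨e, x, hex⟩ := (List.eq_nil_or_concat d).resolve_left hd
      rw [List.concat_eq_append] at hex
      subst hex
      rw [PySem.List.pyRange_neg_one_cons (by omega)]
      simp only [List.foldl_cons]
      rw [show (((k + 1 : Nat)) : Int) = (k : Int) + 1 by push_cast; ring]
      -- the step at i = k+1
      have hstep : stepA (pre' ++ [v], rot (e ++ [x])) ((k : Int) + 1)
          = (pre', rot (v :: rot (e ++ [x]))) := by
        unfold stepA
        have hpop1 : PySem.List.pop? (pre' ++ [v]) ((k : Int) + 1) = some (v, pre') := by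
          have := pop?_concat pre' v
          rwa [hp, Nat.cast_add, Nat.cast_one] at this
        rw [hpop1]
        simp only
        rw [PySem.List.insert_zero]
        rw [if_pos (by omega)]
        obtain ⟨e', x', he'⟩ := (List.eq_nil_or_concat (v :: rot (e ++ [x]))).resolve_left (by simp)
        rw [List.concat_eq_append] at he'
        rw [he']
        have hpop2 : PySem.List.pop? (e' ++ [x']) (((e' ++ [x']).length : Int) - 1)
            = some (x', e') := by
          have := pop?_concat e' x'
          rw [show (((e' ++ [x']).length : Int) - 1) = (e'.length : Int) by simp]
          exact this
        rw [hpop2]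
        simp [PySem.List.insert_zero, rot_concat]
      rw [hstep]
      rw [show ((k : Int) + 1 - 1) = (k : Int) by ring]
      rw [ih pre' (v :: rot (e ++ [x])) hp (by simp)]
      rw [reveal_cons_rot]
      simp

lemma revealA (A : List Int) : reveal (poker_reverse A) = A := by
  rcases List.eq_nil_or_concat A with rfl | ⟨B, v, hA⟩
  · simp [poker_reverse, reveal, PySem.List.pyRange_neg_one_eq_nil]
  · rw [List.concat_eq_append] at hA
    subst hA
    unfold poker_reverse
    rw [show (((B ++ [v]).length : Int) - 1) = (B.length : Int) by simp]
    rw [PySem.List.pyRange_neg_one_cons (by omega)]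
    simp only [List.foldl_cons]
    rcases List.eq_nil_or_concat B with rfl | ⟨B', b, hB⟩
    · -- single element
      rw [show stepA ([] ++ [v], []) ((([] : List Int).length : Int))
            = ([], [v]) by simp [stepA, PySem.List.pop?_zero_cons, PySem.List.insert_zero]]
      rw [show ((([] : List Int).length : Int) - 1) = (-1 : Int) by simp]
      rw [PySem.List.pyRange_neg_one_eq_nil (by norm_num)]
      simp [reveal]
    · -- at least two elements: first iteration leaves state (B' ++ [b], rot [v])
      rw [List.concat_eq_append] at hB
      subst hB
      have hstep : stepA ((B' ++ [b]) ++ [v], []) (((B' ++ [b]).length : Int))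
          = (B' ++ [b], rot [v]) := by
        unfold stepA
        rw [pop?_concat]
        simp only
        rw [PySem.List.insert_zero]
        rw [if_pos (by intro hc; simp at hc; omega)]
        rw [show PySem.List.pop? [v] (((v :: ([] : List Int)).length : Int) - 1)
              = some (v, []) by simp]
        simp [PySem.List.insert_zero, rot]
      rw [hstep]
      have hb : (B' ++ [b]).length = B'.length + 1 := by simp
      rw [show (((B' ++ [b]).length : Int) - 1) = ((B'.length : Nat) : Int) by simp]
      rw [lemA B'.length (B' ++ [b]) [v] hb (by simp)]
      simp [reveal]

-- ===== B side: reveal (poker_reverse_alt A) = A =====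

lemma lemB : ∀ (vs : List Int) (q : List Nat) (ret : List Int),
    vs.length = q.length → q.Nodup → (∀ p ∈ q, p < ret.length) →
    ((reveal q).map (fun p => ((vs.foldl stepB (q, ret)).2).getD p 0) = vs
      ∧ ((vs.foldl stepB (q, ret)).2).length = ret.length
      ∧ ∀ j, j ∉ q → ((vs.foldl stepB (q, ret)).2).getD j 0 = ret.getD j 0) := by
  intro vs
  induction vs with
  | nil =>
      intro q ret hlen _ _
      have : q = [] := List.length_eq_zero_iff.mp (by simpa using hlen.symm)
      subst this
      simp [reveal]
  | cons v vs' ih =>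
      intro q ret hlen hnd hb
      match q, hlen with
      | p :: q', hlen =>
        have hplt : p < ret.length := hb p (by simp)
        simp only [List.foldl_cons]
        rw [show stepB (p :: q', ret) v
              = (match q' with | [] => ([], ret.set p v)
                               | p2 :: rest => (rest ++ [p2], ret.set p v)) by
          cases q' <;> simp [stepB]]
        match q', hlen with
        | [], hlen =>
          have : vs' = [] := List.length_eq_zero_iff.mp (by simpa using hlen)
          subst this
          refine ⟨?_, by simp, ?_⟩
          · simp [reveal, List.getD_eq_getElem?_getD, List.getElem?_set_self hplt]
          · intro j hj
            simp at hj
            simp [List.getD_eq_getElem?_getD, List.getElem?_set_ne (by omega : p ≠ j)]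
        | p2 :: rest, hlen =>
          have hperm : (rest ++ [p2]).Perm (p2 :: rest) := List.perm_append_singleton p2 rest
          have hnd' : (rest ++ [p2]).Nodup := hperm.nodup_iff.mpr (List.nodup_cons.mp hnd).2
          have hb' : ∀ x ∈ rest ++ [p2], x < (ret.set p v).length := by
            intro x hx
            have : x ∈ p2 :: rest := hperm.mem_iff.mp hx
            have : x ∈ p :: p2 :: rest := by simp [this]
            simpa using hb x this
          have hlen' : vs'.length = (rest ++ [p2]).length := by simpa using hlen
          obtain ⟨h1, h2, h3⟩ := ih (rest ++ [p2]) (ret.set p v) hlen' hnd' hb'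
          have hpnot : p ∉ rest ++ [p2] := by
            intro hmem
            have : p ∈ p2 :: rest := hperm.mem_iff.mp hmem
            exact (List.nodup_cons.mp hnd).1 (by simpa using this)
          refine ⟨?_, by simpa using h2, ?_⟩
          · rw [reveal]
            simp only [List.map_cons]
            rw [h1, h3 p hpnot]
            simp [List.getD_eq_getElem?_getD, List.getElem?_set_self hplt]
          · intro j hj
            simp at hj
            rw [h3 j (by
              intro hmem
              have : j ∈ p2 :: rest := hperm.mem_iff.mp hmem
              simp at this
              rcases this with h | h
              · exact hj.2.1 h
              · exact hj.2.2 h)]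
            simp [List.getD_eq_getElem?_getD, List.getElem?_set_ne (by omega : p ≠ j)]

lemma reveal_eq_map (l : List Int) :
    reveal l = (reveal (List.range l.length)).map (fun p => l.getD p 0) := by
  conv_lhs => rw [show l = (List.range l.length).map (fun p => l.getD p 0) by
    apply List.ext_getElem (by simp)
    intro i h1 h2
    simp [List.getD_eq_getElem?_getD, List.getElem?_eq_getElem h1]]
  rw [reveal_map]

lemma revealB (A : List Int) : reveal (poker_reverse_alt A) = A := by
  unfold poker_reverse_alt
  obtain ⟨h1, h2, _⟩ := lemB A (List.range A.length) (List.replicate A.length 0)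
    (by simp) (List.nodup_range) (by intro p hp; simpa using List.mem_range.mp hp)
  rw [reveal_eq_map]
  rw [show ((A.foldl stepB (List.range A.length, List.replicate A.length 0)).2).length
        = A.length by simpa using h2]
  exact h1

-- ===== VERDICT (by name: the statement is the Claim_ definition above) =====
theorem poker_reverse_spec : Claim_equal_poker_reverse := by
  intro A _
  unfold Spec_poker_reverse
  exact reveal_inj _ _ ((revealA A).trans (revealB A).symm)
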